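-- pv_equiv track=rewrite | github.com/JuanDiegoAvila/Laboratorio_Compiladores | Automatas/postfix.py | deconstruct_expresion
-- ===== SOURCE A (Python) =====
-- def deconstruct_expresion(expresion):
--         temp_expresion = ([*expresion])
--         stack = []
--         es_comilla = False
--         temp = []
--
--         for i in range(len(temp_expresion)):
--             if temp_expresion[i] == "'":
--                 es_comilla = not es_comilla
--                 temp.append(temp_expresion[i])
--
--                 if not es_comilla:
--                     stack.append("".join(temp))
--                     temp = []
--
--             elif es_comilla:
--                 temp.append(temp_expresion[i])
--             else:
--                 stack.append(temp_expresion[i])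
--         return stack
-- ===== SOURCE B (Python) =====
-- def deconstruct_expresion(expresion):
--     out = []
--     it = iter(expresion)
--     for c in it:
--         if c != "'":
--             out.append(c)
--         else:
--             temp = [c]
--             for d in it:
--                 temp.append(d)
--                 if d == "'":
--                     out.append("".join(temp))
--                     break
--             else:
--                 break
--     return out
-- ===== Notes on version B (the rewrite author's own statement) =====
-- stated objective: alternative
-- what changed: Replaces A's single loop with a per-character boolean quote-flag and pending buffer by a nested-loop tokenizer over one shared iterator: the inner loop consumes a whole quoted token (or, exhausting the iterator, drops the unterminated tail), so no state flag is carried.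
import Mathlib
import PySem

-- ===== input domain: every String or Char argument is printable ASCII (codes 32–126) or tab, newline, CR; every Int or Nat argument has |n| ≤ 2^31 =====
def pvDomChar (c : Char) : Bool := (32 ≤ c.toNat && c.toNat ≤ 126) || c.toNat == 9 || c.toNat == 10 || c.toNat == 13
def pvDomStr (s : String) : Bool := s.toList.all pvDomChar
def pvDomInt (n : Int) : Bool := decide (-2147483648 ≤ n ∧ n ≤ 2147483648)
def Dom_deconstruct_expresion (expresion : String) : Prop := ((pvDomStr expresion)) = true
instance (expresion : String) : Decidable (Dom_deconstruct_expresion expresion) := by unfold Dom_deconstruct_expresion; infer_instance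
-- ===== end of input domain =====

-- B replaces A's per-character quote-flag state machine with a nested-loop tokenizer over one
-- shared iterator: the inner loop consumes a whole quoted token at a time; alternative
-- decomposition, same return value.

-- ===== PORT A =====
-- one step of A's for-loop body; state = (stack, es_comilla, temp)
def pvStepA (st : List String × Bool × List Char) (c : Char) : List String × Bool × List Char :=
  if c = '\'' then
    let es' := !st.2.1
    let temp' := st.2.2 ++ [c]
    if es' = false then (st.1 ++ [String.ofList temp'], es', [])
    else (st.1, es', temp')
  else if st.2.1 then (st.1, st.2.1, st.2.2 ++ [c])
  else (st.1 ++ [String.ofList [c]], st.2.1, st.2.2)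

def deconstruct_expresion (expresion : String) : List String :=
  -- temp_expresion = [*expresion]; for i in range(len(..)) reads the chars in order
  (expresion.toList.foldl pvStepA ([], false, [])).1

-- ===== PORT B =====
-- Source B's inner 'for d in it' loop: consume up to and including the closing quote;
-- some (temp, rest) = broke at a closing quote, none = iterator exhausted (for-else)
def pvScanB : List Char → List Char → Option (List Char × List Char)
  | [], _ => none
  | d :: rest, temp =>
    if d = '\'' then some (temp ++ [d], rest) else pvScanB rest (temp ++ [d])

-- termination measure for pvGoB (cited by its decreasing_by)
lemma pvScanB_length_lt : ∀ (cs temp tok rest' : List Char),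
    pvScanB cs temp = some (tok, rest') → rest'.length < cs.length := by
  intro cs
  induction cs with
  | nil => intro temp tok rest' h; simp [pvScanB] at h
  | cons d rest ih =>
    intro temp tok rest' h
    rw [pvScanB] at h
    by_cases hd : d = '\''
    · simp [hd] at h
      simp [h.2]
    · simp [hd] at h
      exact Nat.lt_succ_of_lt (ih _ _ _ h)

-- Source B's outer 'for c in it' loop; the iterator's unread part is the list argument
def pvGoB : List Char → List String → List String
  | [], out => out
  | c :: rest, out =>
    if c ≠ '\'' then pvGoB rest (out ++ [String.ofList [c]])
    else
      match h : pvScanB rest [c] with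
      | some (tok, rest') => pvGoB rest' (out ++ [String.ofList tok])
      | none => out
termination_by cs _ => cs.length
decreasing_by
  · simp
  · exact Nat.lt_succ_of_lt (pvScanB_length_lt rest [c] tok rest' h)

def deconstruct_expresion_alt (expresion : String) : List String :=
  pvGoB expresion.toList []

-- ===== PRECONDITION & SPEC =====
def Spec_deconstruct_expresion (expresion : String) (out : List String) : Prop := out = deconstruct_expresion_alt expresion
instance (expresion : String) (out : List String) : Decidable (Spec_deconstruct_expresion expresion out) := by unfold Spec_deconstruct_expresion; infer_instance

-- ===== CLAIM (what is proved, stated in full; the proofs are below) =====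
def Claim_equal_deconstruct_expresion : Prop := ∀ (expresion : String), Dom_deconstruct_expresion expresion → Spec_deconstruct_expresion expresion (deconstruct_expresion expresion)

-- ===== LEMMAS AND PROOFS =====

-- A's fold from the "inside quotes" state scans exactly like B's inner loop
lemma pvFoldA_open (cs : List Char) : ∀ (stack : List String) (temp : List Char),
    (cs.foldl pvStepA (stack, true, temp)).1 =
      match pvScanB cs temp with
      | none => stack
      | some (tok, rest) => (rest.foldl pvStepA (stack ++ [String.ofList tok], false, [])).1 := by
  induction cs with
  | nil => intro stack temp; simp [pvScanB]
  | cons c cs ih =>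
    intro stack temp
    by_cases hc : c = '\''
    · subst hc
      simp [pvScanB, pvStepA]
    · rw [List.foldl_cons]
      have hstep : pvStepA (stack, true, temp) c = (stack, true, temp ++ [c]) := by
        simp [pvStepA, hc]
      rw [hstep, ih]
      simp [pvScanB, hc]

lemma pvFoldA_closed : ∀ (n : Nat) (cs : List Char), cs.length ≤ n →
    ∀ (stack : List String), (cs.foldl pvStepA (stack, false, [])).1 = pvGoB cs stack := by
  intro n
  induction n with
  | zero =>
    intro cs h stack
    have : cs = [] := List.eq_nil_of_length_eq_zero (Nat.le_zero.mp h)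
    subst this; rw [pvGoB]; rfl
  | succ n ih =>
    intro cs h stack
    cases cs with
    | nil => rw [pvGoB]; rfl
    | cons c rest =>
      by_cases hc : c = '\''
      · subst hc
        rw [List.foldl_cons]
        have hstep : pvStepA (stack, false, []) '\'' = (stack, true, ['\'']) := by
          simp [pvStepA]
        rw [hstep, pvFoldA_open]
        conv_rhs => rw [pvGoB]
        simp only [ne_eq, not_true_eq_false, if_false]
        cases hs : pvScanB rest ['\''] with
        | none => simp
        | some p =>
          obtain ⟨tok, rest'⟩ := p
          have hlen : rest'.length ≤ n := by
            have := pvScanB_length_lt rest ['\''] tok rest' hs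
            simp at h; omega
          simp only []
          rw [ih _ hlen]
      · rw [List.foldl_cons]
        have hstep : pvStepA (stack, false, []) c = (stack ++ [String.ofList [c]], false, []) := by
          simp [pvStepA, hc]
        rw [hstep]
        have hlen : rest.length ≤ n := by simp at h; omega
        rw [ih _ hlen]
        conv_rhs => rw [pvGoB]
        simp [hc]

-- ===== VERDICT (by name: the statement is the Claim_ definition above) =====
theorem deconstruct_expresion_spec : Claim_equal_deconstruct_expresion := by
  intro expresion _
  unfold Spec_deconstruct_expresion deconstruct_expresion deconstruct_expresion_alt
  exact pvFoldA_closed expresion.toList.length expresion.toList (Nat.le_refl _) []
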